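-- pv_equiv track=rewrite | github.com/ata-nas/Softuni-Fundamentals | exercises/15_lists_advanced_more_exercises/02_take_skip_rope.py | decoding_algorithm
-- ===== SOURCE A (Python) =====
-- def decoding_algorithm(encoded_string: str):
--     decoded_string = ''
--
--     numbers_list = [int(num) for num in encoded_string if num.isdigit()]
--     non_numbers_string = "".join([item for item in encoded_string if not item.isdigit()])
--
--     takes_list = [int(num) for index, num in enumerate(numbers_list) if index % 2 == 0]
--     skips_list = [int(num) for index, num in enumerate(numbers_list) if index % 2 != 0]
--
--     while non_numbers_string:
--         if not takes_list or not skips_list: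
--             break
--
--         for index in range(takes_list[0]):
--             if not non_numbers_string:
--                 break
--             decoded_string += non_numbers_string[0]
--             non_numbers_string = non_numbers_string[1:]
--
--         takes_list.pop(0)
--
--         for index in range(skips_list[0]):
--             if not non_numbers_string:
--                 break
--             non_numbers_string = non_numbers_string[1:]
--
--         skips_list.pop(0)
--
--     return decoded_string
-- ===== SOURCE B (Python) =====
-- def decoding_algorithm(encoded_string: str):
--     numbers = [int(c) for c in encoded_string if c.isdigit()]
--     letters = ''.join(c for c in encoded_string if not c.isdigit())
--     out = []
--     pos = 0
--     for take, skip in zip(numbers[0::2], numbers[1::2]):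
--         out.append(letters[pos:pos + take])
--         pos += take + skip
--     return ''.join(out)
-- ===== Notes on version B (the rewrite author's own statement) =====
-- stated objective: simpler
-- what changed: Replaced A's while-loop over two pop(0) queues with char-by-char inner take/skip loops that repeatedly rebuild the string by one pass over zip(numbers[0::2], numbers[1::2]) keeping a running position and appending slices.
import Mathlib
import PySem

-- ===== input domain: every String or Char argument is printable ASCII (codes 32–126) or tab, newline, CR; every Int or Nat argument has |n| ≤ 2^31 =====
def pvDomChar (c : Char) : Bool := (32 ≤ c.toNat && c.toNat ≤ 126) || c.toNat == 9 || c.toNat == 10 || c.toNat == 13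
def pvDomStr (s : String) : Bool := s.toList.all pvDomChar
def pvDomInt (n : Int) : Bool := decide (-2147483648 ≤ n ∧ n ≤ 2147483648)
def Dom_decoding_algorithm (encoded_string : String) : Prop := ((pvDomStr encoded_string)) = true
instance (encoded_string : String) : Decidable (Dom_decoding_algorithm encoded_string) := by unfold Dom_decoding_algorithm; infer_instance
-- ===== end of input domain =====

-- B replaces A's while-loop with pop(0) queues and char-by-char inner loops by one
-- slice-based pass over zipped (take, skip) pairs with a running position (objective: simpler).

-- ===== PORT A =====
-- int(c) for a single digit char c (the comprehensions filter on isdigit first): exact on digits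
def pvDigitVal (c : Char) : Int := (c.toNat : Int) - 48

-- 'for index in range(takes_list[0]): if not s: break; dec += s[0]; s = s[1:]'
def pvA_takeLoop : Nat → List Char → List Char → List Char × List Char
  | 0, dec, s => (dec, s)
  | _ + 1, dec, [] => (dec, [])
  | n + 1, dec, c :: rest => pvA_takeLoop n (dec ++ [c]) rest

-- 'for index in range(skips_list[0]): if not s: break; s = s[1:]'
def pvA_skipLoop : Nat → List Char → List Char
  | 0, s => s
  | _ + 1, [] => []
  | n + 1, _ :: rest => pvA_skipLoop n rest

-- the while-loop: state = (non_numbers_string, takes_list, skips_list, decoded_string)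
def pvA_while : List Char → List Int → List Int → List Char → List Char
  | s, takes, skips, dec =>
    if s = [] then dec
    else
      match takes, skips with
      | [], _ => dec
      | _, [] => dec
      | t :: ts, k :: ks =>
        let (dec', s') := pvA_takeLoop t.toNat dec s
        let s'' := pvA_skipLoop k.toNat s'
        pvA_while s'' ts ks dec'
  termination_by _ takes _ _ => takes.length

def decoding_algorithm (encoded_string : String) : String :=
  let chars := encoded_string.toList
  let numbers_list := (chars.filter (fun c => PySem.Chars.isdigit c)).map pvDigitVal
  let non_numbers_string := chars.filter (fun c => !PySem.Chars.isdigit c)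
  let takes_list := ((PySem.List.enumerate numbers_list 0).filter
      (fun p => PySem.Int.mod p.1 2 == 0)).map (·.2)
  let skips_list := ((PySem.List.enumerate numbers_list 0).filter
      (fun p => !(PySem.Int.mod p.1 2 == 0))).map (·.2)
  String.ofList (pvA_while non_numbers_string takes_list skips_list [])

-- ===== PORT B =====
-- numbers[0::2]: every second element (step-2 slice with nonneg bounds, exact)
def pvEveryOther : List Int → List Int
  | [] => []
  | [x] => [x]
  | x :: _ :: rest => x :: pvEveryOther rest

-- the for-loop over zip(takes, skips): state = (pos, out); letters[pos:pos+take]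
-- is (letters.drop pos).take take — exact since pos and take are always ≥ 0 here
def pvB_loop : List (Int × Int) → List Char → Nat → List Char → List Char
  | [], _, _, out => out
  | (t, k) :: ps, letters, pos, out =>
    pvB_loop ps letters (pos + t.toNat + k.toNat) (out ++ (letters.drop pos).take t.toNat)

def decoding_algorithm_alt (encoded_string : String) : String :=
  let chars := encoded_string.toList
  let numbers := (chars.filter (fun c => PySem.Chars.isdigit c)).map pvDigitVal
  let letters := chars.filter (fun c => !PySem.Chars.isdigit c)
  String.ofList (pvB_loop ((pvEveryOther numbers).zip (pvEveryOther (numbers.drop 1))) letters 0 [])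

-- ===== PRECONDITION & SPEC =====
def Spec_decoding_algorithm (encoded_string : String) (out : String) : Prop := out = decoding_algorithm_alt encoded_string
instance (encoded_string : String) (out : String) : Decidable (Spec_decoding_algorithm encoded_string out) := by unfold Spec_decoding_algorithm; infer_instance

-- ===== CLAIM (what is proved, stated in full; the proofs are below) =====
def Claim_equal_decoding_algorithm : Prop := ∀ (encoded_string : String), Dom_decoding_algorithm encoded_string → Spec_decoding_algorithm encoded_string (decoding_algorithm encoded_string)

-- ===== LEMMAS AND PROOFS =====

-- A's take-loop is "append the taken prefix; keep the rest"
theorem pvA_takeLoop_eq (n : Nat) (dec s : List Char) :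
    pvA_takeLoop n dec s = (dec ++ s.take n, s.drop n) := by
  induction n generalizing dec s with
  | zero => simp [pvA_takeLoop]
  | succ n ih =>
    cases s with
    | nil => simp [pvA_takeLoop]
    | cons c rest => simp [pvA_takeLoop, ih]

theorem pvA_skipLoop_eq (n : Nat) (s : List Char) :
    pvA_skipLoop n s = s.drop n := by
  induction n generalizing s with
  | zero => simp [pvA_skipLoop]
  | succ n ih =>
    cases s with
    | nil => simp [pvA_skipLoop]
    | cons c rest => simp [pvA_skipLoop, ih]

-- B's loop phrased on the remaining suffix: drop pos commutes with the step
theorem pvB_loop_drop (ps : List (Int × Int)) (letters : List Char) (pos : Nat) (out : List Char) :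
    pvB_loop ps letters pos out = pvB_loop ps (letters.drop pos) 0 out := by
  induction ps generalizing letters pos out with
  | nil => rfl
  | cons p ps ih =>
    obtain ⟨t, k⟩ := p
    rw [pvB_loop, pvB_loop, ih, ih (letters.drop pos)]
    simp [List.drop_drop]
    ring_nf

-- B's loop on an exhausted letters suffix appends nothing
theorem pvB_loop_nil (ps : List (Int × Int)) (pos : Nat) (out : List Char) :
    pvB_loop ps [] pos out = out := by
  induction ps generalizing pos out with
  | nil => rfl
  | cons p ps ih => obtain ⟨t, k⟩ := p; simp [pvB_loop, ih]

-- main correspondence: A's while-loop = B's zip-fold on the same data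
theorem pvA_while_eq_pvB_loop (takes skips : List Int) (s dec : List Char) :
    pvA_while s takes skips dec = pvB_loop (takes.zip skips) s 0 dec := by
  induction takes generalizing skips s dec with
  | nil =>
    rw [pvA_while]
    split <;> simp [pvB_loop]
  | cons t ts ih =>
    cases skips with
    | nil =>
      rw [pvA_while]
      split
      · simp [pvB_loop]
      · simp [pvB_loop]
      · intro h
        exact absurd h (List.cons_ne_nil _ _)
    | cons k ks =>
      rw [pvA_while]
      by_cases hs : s = []
      · simp [hs, pvB_loop_nil]
      · simp only [hs, if_false]
        rw [pvA_takeLoop_eq, pvA_skipLoop_eq]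
        simp only [List.zip_cons_cons, pvB_loop]
        rw [ih, pvB_loop_drop (ts.zip ks) s, List.drop_drop]
        simp

-- A's enumerate/parity comprehensions are the even- and odd-position sublists
theorem pvTakes_eq (xs : List Int) (n : Int) (hn : PySem.Int.mod n 2 = 0) :
    ((PySem.List.enumerate xs n).filter (fun p => PySem.Int.mod p.1 2 == 0)).map (·.2)
      = pvEveryOther xs := by
  induction xs using pvEveryOther.induct generalizing n with
  | case1 => simp [PySem.List.enumerate_nil, pvEveryOther]
  | case2 x =>
    have hdvd : (2 : Int) ∣ n := (PySem.Int.mod_eq_zero_iff_dvd n 2).mp hn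
    simp [PySem.List.enumerate_cons, PySem.List.enumerate_nil, List.filter_cons, hdvd,
      pvEveryOther]
  | case3 x y rest ih =>
    have h1 : PySem.Int.mod (n + 1) 2 = 1 := by
      simp [PySem.Int.mod, Int.fmod_eq_emod] at hn ⊢; omega
    have h2 : PySem.Int.mod (n + 1 + 1) 2 = 0 := by
      simp [PySem.Int.mod, Int.fmod_eq_emod] at hn ⊢; omega
    simp only [PySem.List.enumerate_cons, List.filter_cons, hn, h1, beq_iff_eq,
      reduceIte, one_ne_zero, List.map_cons, pvEveryOther]
    exact congrArg (x :: ·) (ih _ h2)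

theorem pvSkips_eq (xs : List Int) (n : Int) (hn : PySem.Int.mod n 2 = 0) :
    ((PySem.List.enumerate xs n).filter (fun p => !(PySem.Int.mod p.1 2 == 0))).map (·.2)
      = pvEveryOther (xs.drop 1) := by
  induction xs using pvEveryOther.induct generalizing n with
  | case1 => simp [PySem.List.enumerate_nil, pvEveryOther]
  | case2 x =>
    have hm : n % 2 = 0 := by simpa [PySem.Int.mod, Int.fmod_eq_emod] using hn
    have hm1 : ¬ (n % 2 = 1) := by omega
    simp [PySem.List.enumerate_cons, PySem.List.enumerate_nil, List.filter_cons, hm1,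
      pvEveryOther]
  | case3 x y rest ih =>
    have h1 : PySem.Int.mod (n + 1) 2 = 1 := by
      simp [PySem.Int.mod, Int.fmod_eq_emod] at hn ⊢; omega
    have h2 : PySem.Int.mod (n + 1 + 1) 2 = 0 := by
      simp [PySem.Int.mod, Int.fmod_eq_emod] at hn ⊢; omega
    have hrec := ih _ h2
    simp only [List.drop_one] at hrec
    simp only [PySem.List.enumerate_cons, List.filter_cons, hn, h1, beq_iff_eq,
      reduceIte, one_ne_zero, Bool.not_true, List.drop_one]
    cases rest with
    | nil => simpa [pvEveryOther, PySem.List.enumerate_nil] using hrec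
    | cons z rest' => simpa [pvEveryOther] using hrec

-- ===== VERDICT (by name: the statement is the Claim_ definition above) =====
theorem decoding_algorithm_spec : Claim_equal_decoding_algorithm := by
  intro s _
  unfold Spec_decoding_algorithm decoding_algorithm decoding_algorithm_alt
  simp only []
  rw [pvTakes_eq _ 0 rfl, pvSkips_eq _ 0 rfl, pvA_while_eq_pvB_loop]
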